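-- pv_equiv track=rewrite | github.com/hwennnn/leetcode-solutions | problems/cycle_length_queries_in_a_tree/solution.py | cycleLengthQueries
-- ===== SOURCE A (Python) =====
-- from typing import List
--
-- def cycleLengthQueries(n: int, queries: List[List[int]]) -> List[int]:
--     res = []
--
--     for a, b in queries:
--         count = 1
--
--         while a != b:
--             if a > b:
--                 a //= 2
--             else:
--                 b //= 2
--
--             count += 1
--
--         res.append(count)
--
--     return res
-- ===== SOURCE B (Python) =====
-- from typing import List
--
-- def cycleLengthQueries(n: int, queries: List[List[int]]) -> List[int]:
--     res = []
--     for a, b in queries: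
--         da = a.bit_length()
--         db = b.bit_length()
--         if da > db:
--             a >>= da - db
--         else:
--             b >>= db - da
--         m = (a ^ b).bit_length()
--         res.append(abs(da - db) + 2 * m + 1)
--     return res
-- ===== Notes on version B (the rewrite author's own statement) =====
-- stated objective: alternative
-- what changed: Per query, A walks the two nodes up the tree one halving step at a time counting edges; B computes the answer in closed form from bit_lengths: align the deeper node with a single shift (|depth difference| edges) and read the remaining 2*bit_length(a^b) edges off one XOR.
-- outside the precondition, e.g. on cycleLengthQueries(1, [[-1, -1]]): A returns [1], B returns [1]; on cycleLengthQueries(1, [[1, 2, 3]]): A raises ValueError, B raises ValueError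
import Mathlib
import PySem

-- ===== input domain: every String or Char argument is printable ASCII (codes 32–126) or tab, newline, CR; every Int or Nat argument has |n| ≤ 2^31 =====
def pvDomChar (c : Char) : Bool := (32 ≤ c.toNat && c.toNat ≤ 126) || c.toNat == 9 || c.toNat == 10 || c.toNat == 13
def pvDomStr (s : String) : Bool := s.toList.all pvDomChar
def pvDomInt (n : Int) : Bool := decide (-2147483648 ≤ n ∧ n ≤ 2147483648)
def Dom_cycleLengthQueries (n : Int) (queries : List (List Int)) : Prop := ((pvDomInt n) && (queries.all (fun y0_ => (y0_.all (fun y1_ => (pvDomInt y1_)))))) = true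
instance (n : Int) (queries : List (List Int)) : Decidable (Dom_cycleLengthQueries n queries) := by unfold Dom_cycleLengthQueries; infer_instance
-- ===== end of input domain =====

-- B replaces A's step-by-step halving walk per query by a closed-form bit computation:
-- align depths via bit_length and shifts, then read the remaining distance off the XOR's bit_length.

-- ===== PORT A =====
-- the while loop of A; fuel only makes the recursion total (each real iteration
-- decreases a+b when both are nonnegative, so (a+b).toNat fuel is never exhausted on Pre_)
def cycleLoopA : Nat → Int → Int → Int → Int
  | 0, _, _, count => count
  | fuel+1, a, b, count =>
    if a ≠ b then
      if a > b then cycleLoopA fuel (PySem.Int.floordiv a 2) b (count + 1)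
      else cycleLoopA fuel a (PySem.Int.floordiv b 2) (count + 1)
    else count

def cycleLengthQueries (n : Int) (queries : List (List Int)) : List Int :=
  queries.foldl (fun res q =>
    match q with
    | [a, b] => res ++ [cycleLoopA (a + b).toNat a b 1]
    | _ => res) []

-- ===== PORT B =====
def cycleLengthQueries_alt (n : Int) (queries : List (List Int)) : List Int :=
  queries.foldl (fun res q =>
    match q with
    | [a, b] =>
      let da := PySem.Int.bitLength a
      let db := PySem.Int.bitLength b
      let a' := if da > db then a >>> (da - db) else a
      let b' := if da > db then b else b >>> (db - da)
      let m := PySem.Int.bitLength (PySem.Int.bxor a' b')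
      res ++ [|(da : Int) - (db : Int)| + 2 * (m : Int) + 1]
    | [] => res
    | [_] => res
    | _ :: _ :: _ :: _ => res) []

-- ===== PRECONDITION & SPEC =====
-- Pre_ excludes rows that are not pairs (A's unpacking raises ValueError) and rows with a
-- negative entry (A's halving loop fails to terminate on almost all of them; tree nodes are ≥ 1).
def Pre_cycleLengthQueries (n : Int) (queries : List (List Int)) : Prop :=
  ∀ q ∈ queries, q.length = 2 ∧ ∀ x ∈ q, 0 ≤ x
instance (n : Int) (queries : List (List Int)) : Decidable (Pre_cycleLengthQueries n queries) := by
  unfold Pre_cycleLengthQueries; infer_instance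

def pvWitness_cycleLengthQueries : Int × List (List Int) := (2, [[5, 3], [1, 1], [7, 2]])

def Spec_cycleLengthQueries (n : Int) (queries : List (List Int)) (out : List Int) : Prop := out = cycleLengthQueries_alt n queries
instance (n : Int) (queries : List (List Int)) (out : List Int) : Decidable (Spec_cycleLengthQueries n queries out) := by unfold Spec_cycleLengthQueries; infer_instance

-- ===== CLAIM (what is proved, stated in full; the proofs are below) =====
def Claim_equal_cycleLengthQueries : Prop := ∀ (n : Int) (queries : List (List Int)), Dom_cycleLengthQueries n queries → Pre_cycleLengthQueries n queries → Spec_cycleLengthQueries n queries (cycleLengthQueries n queries)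

-- ===== LEMMAS AND PROOFS =====

lemma loopA_self (fuel : Nat) (a c : Int) : cycleLoopA fuel a a c = c := by
  cases fuel <;> simp [cycleLoopA]

lemma loopA_comm (fuel : Nat) : ∀ a b c : Int, cycleLoopA fuel a b c = cycleLoopA fuel b a c := by
  induction fuel with
  | zero => intro a b c; rfl
  | succ f ih =>
    intro a b c
    rcases lt_trichotomy a b with h | h | h
    · simp [cycleLoopA, ne_of_lt h, (ne_of_lt h).symm, h, not_lt_of_gt h, ih]
    · subst h; rfl
    · simp [cycleLoopA, ne_of_gt h, (ne_of_gt h).symm, h, not_lt_of_gt h, ih]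

lemma loopA_gt (f : Nat) (a b c : Int) (h : b < a) :
    cycleLoopA (f+1) a b c = cycleLoopA f (PySem.Int.floordiv a 2) b (c+1) := by
  simp [cycleLoopA, (ne_of_gt h), h]

lemma bl_pos (m : Nat) (h : 0 < m) : 0 < PySem.Int.bitLength (m : Int) := by
  rw [PySem.Int.bitLength_natCast h]; omega

lemma bl_eq_zero (m : Nat) (h : PySem.Int.bitLength (m : Int) = 0) : m = 0 := by
  by_contra hm
  have := bl_pos m (Nat.pos_of_ne_zero hm)
  omega

lemma lt_of_bl_lt (m k : Nat)
    (h : PySem.Int.bitLength (k : Int) < PySem.Int.bitLength (m : Int)) : k < m := by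
  have h1 : k < 2 ^ PySem.Int.bitLength (k : Int) := by
    have := PySem.Int.lt_two_pow_bitLength (k : Int)
    simpa using this
  have hm0 : (m : Int) ≠ 0 := by
    intro h0
    have : m = 0 := by exact_mod_cast h0
    subst this
    simp [show PySem.Int.bitLength (0 : Int) = 0 from rfl] at h
  have h2 : 2 ^ (PySem.Int.bitLength (m : Int) - 1) ≤ m := by
    have := PySem.Int.two_pow_bitLength_le (m : Int) hm0
    simpa using this
  have hp : 2 ^ PySem.Int.bitLength (k : Int) ≤ 2 ^ (PySem.Int.bitLength (m : Int) - 1) :=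
    Nat.pow_le_pow_right (by omega) (by omega)
  omega

-- two iterations of A's loop when the depths (bit lengths) are equal but the nodes differ
lemma loopA_step2 (na nb : Nat) (f : Nat) (c : Int) (hlt : nb < na)
    (hbl : PySem.Int.bitLength (na : Int) = PySem.Int.bitLength (nb : Int)) (hb : 0 < nb) :
    cycleLoopA (f + 2) (na : Int) (nb : Int) c
      = cycleLoopA f ((na / 2 : Nat) : Int) ((nb / 2 : Nat) : Int) (c + 2) := by
  have hlt' : (nb : Int) < (na : Int) := by exact_mod_cast hlt
  rw [show f + 2 = (f + 1) + 1 by omega, loopA_gt _ _ _ _ hlt']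
  have hfd : PySem.Int.floordiv (na : Int) 2 = ((na / 2 : Nat) : Int) := by
    exact_mod_cast PySem.Int.floordiv_natCast na 2
  rw [hfd]
  have hna : 0 < na := lt_of_le_of_lt (Nat.zero_le _) hlt
  have hrec : PySem.Int.bitLength (na : Int) = PySem.Int.bitLength ((na / 2 : Nat) : Int) + 1 :=
    PySem.Int.bitLength_natCast hna
  have hblb : 0 < PySem.Int.bitLength (nb : Int) := bl_pos nb hb
  have hlt2 : na / 2 < nb := lt_of_bl_lt nb (na / 2) (by omega)
  have hlt2' : ((na / 2 : Nat) : Int) < (nb : Int) := by exact_mod_cast hlt2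
  rw [loopA_comm, loopA_gt _ _ _ _ hlt2', loopA_comm]
  have hfd2 : PySem.Int.floordiv (nb : Int) 2 = ((nb / 2 : Nat) : Int) := by
    exact_mod_cast PySem.Int.floordiv_natCast nb 2
  rw [hfd2, show c + 1 + 1 = c + 2 by ring]

-- A's loop on two nodes of equal depth counts 2 · bit_length(a XOR b) extra edges
lemma loopA_eqlen : ∀ (L na nb fuel : Nat) (c : Int),
    PySem.Int.bitLength (na : Int) = L → PySem.Int.bitLength (nb : Int) = L →
    na + nb ≤ fuel →
    cycleLoopA fuel (na : Int) (nb : Int) c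
      = c + 2 * (PySem.Int.bitLength ((na ^^^ nb : Nat) : Int) : Int) := by
  intro L
  induction L with
  | zero =>
    intro na nb fuel c ha hb _
    have : na = 0 := bl_eq_zero na ha
    have : nb = 0 := bl_eq_zero nb hb
    subst_vars
    simp [loopA_self]
  | succ L ih =>
    intro na nb fuel c ha hb hfuel
    rcases lt_trichotomy na nb with h | h | h
    · -- nb > na : symmetric case, swap with loopA_comm
      have hbx : 0 < na := by
        rcases Nat.eq_zero_or_pos na with h0 | h0
        · exfalso; subst h0; simp at ha
        · exact h0
      obtain ⟨f, rfl⟩ : ∃ f, fuel = f + 2 := ⟨fuel - 2, by omega⟩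
      rw [loopA_comm, loopA_step2 nb na f c h (by omega) hbx, loopA_comm]
      have hra : PySem.Int.bitLength (na : Int) = PySem.Int.bitLength ((na / 2 : Nat) : Int) + 1 :=
        PySem.Int.bitLength_natCast hbx
      have hrb : PySem.Int.bitLength (nb : Int) = PySem.Int.bitLength ((nb / 2 : Nat) : Int) + 1 :=
        PySem.Int.bitLength_natCast (by omega)
      rw [ih (na / 2) (nb / 2) f (c + 2) (by omega) (by omega) (by omega)]
      have hxne : na ^^^ nb ≠ 0 := by
        intro hx
        exact absurd (Nat.xor_eq_zero_iff.mp hx) (by omega)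
      have hxr : PySem.Int.bitLength ((na ^^^ nb : Nat) : Int)
          = PySem.Int.bitLength (((na ^^^ nb) / 2 : Nat) : Int) + 1 :=
        PySem.Int.bitLength_natCast (Nat.pos_of_ne_zero hxne)
      rw [Nat.xor_div_two] at hxr
      rw [hxr]
      push_cast
      ring
    · subst h
      simp [loopA_self, Nat.xor_self]
    · -- na > nb
      have hbx : 0 < nb := by
        rcases Nat.eq_zero_or_pos nb with h0 | h0
        · exfalso; subst h0; simp at hb
        · exact h0
      obtain ⟨f, rfl⟩ : ∃ f, fuel = f + 2 := ⟨fuel - 2, by omega⟩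
      rw [loopA_step2 na nb f c h (by omega) hbx]
      have hra : PySem.Int.bitLength (na : Int) = PySem.Int.bitLength ((na / 2 : Nat) : Int) + 1 :=
        PySem.Int.bitLength_natCast (by omega)
      have hrb : PySem.Int.bitLength (nb : Int) = PySem.Int.bitLength ((nb / 2 : Nat) : Int) + 1 :=
        PySem.Int.bitLength_natCast hbx
      rw [ih (na / 2) (nb / 2) f (c + 2) (by omega) (by omega) (by omega)]
      have hxne : na ^^^ nb ≠ 0 := by
        intro hx
        exact absurd (Nat.xor_eq_zero_iff.mp hx) (by omega)
      have hxr : PySem.Int.bitLength ((na ^^^ nb : Nat) : Int)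
          = PySem.Int.bitLength (((na ^^^ nb) / 2 : Nat) : Int) + 1 :=
        PySem.Int.bitLength_natCast (Nat.pos_of_ne_zero hxne)
      rw [Nat.xor_div_two] at hxr
      rw [hxr]
      push_cast
      ring

-- the alignment phase: the deeper node is halved k times, one edge each
lemma loopA_align : ∀ (k na nb fuel : Nat) (c : Int),
    PySem.Int.bitLength (na : Int) = PySem.Int.bitLength (nb : Int) + k →
    na + nb ≤ fuel →
    cycleLoopA fuel (na : Int) (nb : Int) c
      = c + (k : Int) + 2 * (PySem.Int.bitLength (((na >>> k) ^^^ nb : Nat) : Int) : Int) := by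
  intro k
  induction k with
  | zero =>
    intro na nb fuel c hbl hfuel
    rw [loopA_eqlen (PySem.Int.bitLength (nb : Int)) na nb fuel c (by omega) rfl hfuel]
    simp
  | succ k ih =>
    intro na nb fuel c hbl hfuel
    have hna : 0 < na := by
      rcases Nat.eq_zero_or_pos na with h0 | h0
      · exfalso; subst h0; simp at hbl
      · exact h0
    have hlt : nb < na := lt_of_bl_lt na nb (by omega)
    obtain ⟨f, rfl⟩ : ∃ f, fuel = f + 1 := ⟨fuel - 1, by omega⟩
    have hlt' : (nb : Int) < (na : Int) := by exact_mod_cast hlt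
    rw [loopA_gt _ _ _ _ hlt']
    have hfd : PySem.Int.floordiv (na : Int) 2 = ((na / 2 : Nat) : Int) := by
      exact_mod_cast PySem.Int.floordiv_natCast na 2
    rw [hfd]
    have hra : PySem.Int.bitLength (na : Int) = PySem.Int.bitLength ((na / 2 : Nat) : Int) + 1 :=
      PySem.Int.bitLength_natCast hna
    rw [ih (na / 2) nb f (c + 1) (by omega) (by omega)]
    have hsh : (na / 2) >>> k = na >>> (k + 1) := by
      rw [← Nat.shiftRight_one, ← Nat.shiftRight_add, Nat.add_comm]
    rw [hsh]
    push_cast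
    ring

-- one query: A's counted walk equals B's closed-form expression
lemma query_eq (a b : Int) (ha : 0 ≤ a) (hb : 0 ≤ b) :
    cycleLoopA (a + b).toNat a b 1
      = |(PySem.Int.bitLength a : Int) - (PySem.Int.bitLength b : Int)|
        + 2 * ((PySem.Int.bitLength (PySem.Int.bxor
            (if PySem.Int.bitLength a > PySem.Int.bitLength b then
              a >>> (PySem.Int.bitLength a - PySem.Int.bitLength b) else a)
            (if PySem.Int.bitLength a > PySem.Int.bitLength b then b
              else b >>> (PySem.Int.bitLength b - PySem.Int.bitLength a)))) : Int) + 1 := by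
  obtain ⟨na, rfl⟩ : ∃ na : Nat, a = (na : Int) := ⟨a.toNat, (Int.toNat_of_nonneg ha).symm⟩
  obtain ⟨nb, rfl⟩ : ∃ nb : Nat, b = (nb : Int) := ⟨b.toNat, (Int.toNat_of_nonneg hb).symm⟩
  have hfuel : ((na : Int) + (nb : Int)).toNat = na + nb := by omega
  rw [hfuel]
  by_cases hgt : PySem.Int.bitLength (na : Int) > PySem.Int.bitLength (nb : Int)
  · set k := PySem.Int.bitLength (na : Int) - PySem.Int.bitLength (nb : Int) with hk
    rw [loopA_align k na nb (na + nb) 1 (by omega) (le_refl _)]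
    simp only [hgt, if_pos]
    rw [show (na : Int) >>> k = ((na >>> k : Nat) : Int) from (Int.natCast_shiftRight na k).symm,
      PySem.Int.bxor_natCast]
    have : |(PySem.Int.bitLength (na : Int) : Int) - (PySem.Int.bitLength (nb : Int) : Int)|
        = (k : Int) := by
      rw [abs_of_nonneg (by omega)]
      omega
    rw [this]
    ring
  · set k := PySem.Int.bitLength (nb : Int) - PySem.Int.bitLength (na : Int) with hk
    rw [loopA_comm, loopA_align k nb na (na + nb) 1 (by omega) (by omega)]
    simp only [hgt, if_false]
    rw [show (nb : Int) >>> k = ((nb >>> k : Nat) : Int) from (Int.natCast_shiftRight nb k).symm,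
      PySem.Int.bxor_natCast, Nat.xor_comm]
    have : |(PySem.Int.bitLength (na : Int) : Int) - (PySem.Int.bitLength (nb : Int) : Int)|
        = (k : Int) := by
      rw [abs_of_nonpos (by omega)]
      omega
    rw [this]
    ring

lemma fold_eq : ∀ (qs : List (List Int)),
    (∀ q ∈ qs, q.length = 2 ∧ ∀ x ∈ q, 0 ≤ x) → ∀ acc : List Int,
    qs.foldl (fun res q =>
      match q with
      | [a, b] => res ++ [cycleLoopA (a + b).toNat a b 1]
      | _ => res) acc
    = qs.foldl (fun res q =>
      match q with
      | [a, b] =>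
        let da := PySem.Int.bitLength a
        let db := PySem.Int.bitLength b
        let a' := if da > db then a >>> (da - db) else a
        let b' := if da > db then b else b >>> (db - da)
        let m := PySem.Int.bitLength (PySem.Int.bxor a' b')
        res ++ [|(da : Int) - (db : Int)| + 2 * (m : Int) + 1]
      | [] => res
      | [_] => res
      | _ :: _ :: _ :: _ => res) acc := by
  intro qs
  induction qs with
  | nil => intro _ acc; rfl
  | cons q qs ih =>
    intro h acc
    obtain ⟨hlen, hpos⟩ := h q (List.mem_cons_self ..)
    match q, hlen with
    | [a, b], _ =>
      simp only [List.foldl_cons]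
      rw [query_eq a b (hpos a (by simp)) (hpos b (by simp))]
      exact ih (fun q hq => h q (List.mem_cons_of_mem _ hq)) _

-- ===== VERDICT (by name: the statement is the Claim_ definition above) =====
theorem cycleLengthQueries_spec : Claim_equal_cycleLengthQueries := by
  intro n queries _ hpre
  unfold Spec_cycleLengthQueries cycleLengthQueries cycleLengthQueries_alt
  exact fold_eq queries hpre []
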